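-- pv_equiv track=rewrite | github.com/yessgm/Codewars-Python | 7kyu/pair-zeros.py | pair_zeros
-- ===== SOURCE A (Python) =====
-- def pair_zeros(arr):
--     zeroCount = 0
--     newArr = []
--     for i in range(len(arr)):
--         if arr[i] == 0:
--             zeroCount += 1
--             if zeroCount%2 == 1 :
--                 newArr.append(arr[i])
--         else:
--             newArr.append(arr[i])
--
--     return newArr
-- ===== SOURCE B (Python) =====
-- def pair_zeros(arr):
--     zeros = [i for i, x in enumerate(arr) if x == 0]
--     drop = {j for r, j in enumerate(zeros) if r % 2 == 1}
--     return [x for i, x in enumerate(arr) if i not in drop]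
-- ===== Notes on version B (the rewrite author's own statement) =====
-- stated objective: alternative
-- what changed: Replaces the single pass with a parity counter by an index-based decomposition: first collect the indices of all zeros, take the odd-ranked ones as a drop set, then filter the array by index.
import Mathlib
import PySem

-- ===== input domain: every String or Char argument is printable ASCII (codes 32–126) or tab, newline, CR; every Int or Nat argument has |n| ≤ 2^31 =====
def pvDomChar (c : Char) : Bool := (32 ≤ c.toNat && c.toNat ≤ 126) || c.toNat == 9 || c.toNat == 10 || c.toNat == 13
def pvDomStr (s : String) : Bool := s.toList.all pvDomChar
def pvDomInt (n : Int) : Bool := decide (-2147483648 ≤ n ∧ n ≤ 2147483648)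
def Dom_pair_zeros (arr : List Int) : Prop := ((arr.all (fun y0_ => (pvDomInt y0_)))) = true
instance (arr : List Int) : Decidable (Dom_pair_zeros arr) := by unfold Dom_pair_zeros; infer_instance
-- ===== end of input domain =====

-- B keeps only every odd-ranked zero by a different decomposition (index the zeros, drop the
-- even-ranked occurrences, filter by index) instead of A's one-pass parity counter.

-- ===== PORT A =====
-- one pass with a parity counter, appending kept elements
def pair_zeros (arr : List Int) : List Int :=
  ((PySem.List.pyRange 0 (PySem.List.len arr) 1).foldl
    (fun (st : Int × List Int) i =>
      if PySem.List.pyGetD arr i 0 = 0 then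
        if PySem.Int.mod (st.1 + 1) 2 = 1 then (st.1 + 1, st.2 ++ [PySem.List.pyGetD arr i 0])
        else (st.1 + 1, st.2)
      else (st.1, st.2 ++ [PySem.List.pyGetD arr i 0]))
    ((0 : Int), ([] : List Int))).2

-- ===== PORT B =====
-- collect zero indices, drop the odd-ranked ones, filter the array by index
def pair_zeros_alt (arr : List Int) : List Int :=
  let zeros := ((PySem.List.enumerate arr 0).filter (fun p => p.2 == 0)).map (fun p => p.1)
  let drop : PySem.Set Int :=
    PySem.Set.ofList
      (((PySem.List.enumerate zeros 0).filter (fun p => PySem.Int.mod p.1 2 == 1)).map (fun p => p.2))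
  ((PySem.List.enumerate arr 0).filter (fun p => !(PySem.Set.contains drop p.1))).map (fun p => p.2)

-- ===== PRECONDITION & SPEC =====
def Spec_pair_zeros (arr : List Int) (out : List Int) : Prop := out = pair_zeros_alt arr
instance (arr : List Int) (out : List Int) : Decidable (Spec_pair_zeros arr out) := by unfold Spec_pair_zeros; infer_instance

-- ===== CLAIM (what is proved, stated in full; the proofs are below) =====
def Claim_equal_pair_zeros : Prop := ∀ (arr : List Int), Dom_pair_zeros arr → Spec_pair_zeros arr (pair_zeros arr)

-- ===== LEMMAS AND PROOFS =====

-- reference result: element-wise recursion carrying the number of zeros seen so far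
def pzNorm : List Int → Nat → List Int
  | [], _ => []
  | x :: t, k =>
    if x = 0 then (if k % 2 = 0 then x :: pzNorm t (k + 1) else pzNorm t (k + 1))
    else x :: pzNorm t k

-- the index list B drops, generalized over the rank at which counting starts
def pzDrop (zeros : List Int) (r : Int) : List Int :=
  ((PySem.List.enumerate zeros r).filter (fun p => PySem.Int.mod p.1 2 == 1)).map (fun p => p.2)

-- the zero-index list B builds, generalized over the enumeration start
def pzZeros (l : List Int) (s : Int) : List Int :=
  ((PySem.List.enumerate l s).filter (fun p => p.2 == 0)).map (fun p => p.1)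

lemma pzDrop_cons (i : Int) (z : List Int) (r : Int) :
    pzDrop (i :: z) r =
      if PySem.Int.mod r 2 = 1 then i :: pzDrop z (r + 1) else pzDrop z (r + 1) := by
  by_cases h : r % 2 = 1 <;>
    simp [pzDrop, PySem.List.enumerate_cons, h]

lemma pzDrop_subset (z : List Int) (r : Int) : ∀ j ∈ pzDrop z r, j ∈ z := by
  induction z generalizing r with
  | nil => simp [pzDrop]
  | cons i t ih =>
    intro j hj
    rw [pzDrop_cons] at hj
    split_ifs at hj with h
    · rcases List.mem_cons.mp hj with h' | h'
      · simp [h']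
      · exact List.mem_cons_of_mem _ (ih _ _ h')
    · exact List.mem_cons_of_mem _ (ih _ _ hj)

lemma pzZeros_ge (l : List Int) (s : Int) : ∀ j ∈ pzZeros l s, s ≤ j := by
  intro j hj
  simp only [pzZeros, List.mem_map, List.mem_filter] at hj
  obtain ⟨p, ⟨hp, _⟩, rfl⟩ := hj
  obtain ⟨k, _, rfl⟩ := (PySem.List.mem_enumerate_iff l s p).mp hp
  simp

lemma pzZeros_cons (x : Int) (t : List Int) (s : Int) :
    pzZeros (x :: t) s = if x = 0 then s :: pzZeros t (s + 1) else pzZeros t (s + 1) := by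
  by_cases h : x = 0 <;> simp [pzZeros, PySem.List.enumerate_cons, h]

lemma not_mem_pzDrop_of_lt (t : List Int) (s r j : Int) (hj : j < s) :
    j ∉ pzDrop (pzZeros t s) r := fun h =>
  absurd (pzZeros_ge t s j (pzDrop_subset _ r j h)) (by omega)

-- Set.ofList preserves membership of the drop list
lemma contains_ofList (d : List Int) (i : Int) :
    PySem.Set.contains (PySem.Set.ofList d) i = decide (i ∈ d) := by
  simp [PySem.Set.mem_ofList]

-- B's filter pass computes pzNorm, for any enumeration start s and zero count k
lemma B_loop (l : List Int) (s k : Nat) :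
    ((PySem.List.enumerate l (s : Int)).filter
       (fun p => !(PySem.Set.contains (PySem.Set.ofList (pzDrop (pzZeros l (s : Int)) (k : Int))) p.1))).map
      (fun p => p.2) = pzNorm l k := by
  induction l generalizing s k with
  | nil => simp [pzNorm, PySem.List.enumerate]
  | cons x t ih =>
    have hs1 : ((s : Int) + 1) = ((s + 1 : Nat) : Int) := by push_cast; ring
    have hk1 : ((k : Int) + 1) = ((k + 1 : Nat) : Int) := by push_cast; ring
    have hmodk : PySem.Int.mod (k : Int) 2 = (k : Int) % 2 := by simp [pysem]
    by_cases hx : x = 0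
    · subst hx
      rw [pzZeros_cons, if_pos rfl, pzDrop_cons]
      by_cases hk : k % 2 = 0
      · have h1 : ¬ PySem.Int.mod (k : Int) 2 = 1 := by rw [hmodk]; omega
        rw [if_neg h1, PySem.List.enumerate_cons, List.filter_cons]
        have hhead : (!(PySem.Set.contains
            (PySem.Set.ofList (pzDrop (pzZeros t ((s : Int) + 1)) ((k : Int) + 1))) (s : Int))) = true := by
          rw [contains_ofList]
          simp [not_mem_pzDrop_of_lt t ((s : Int) + 1) ((k : Int) + 1) (s : Int) (by omega)]
        rw [hhead, if_pos rfl]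
        simp only [List.map_cons]
        rw [hs1, hk1, ih (s + 1) (k + 1)]
        simp [pzNorm, hk]
      · have h1 : PySem.Int.mod (k : Int) 2 = 1 := by rw [hmodk]; omega
        rw [if_pos h1, PySem.List.enumerate_cons, List.filter_cons]
        have hhead : (!(PySem.Set.contains
            (PySem.Set.ofList ((s : Int) :: pzDrop (pzZeros t ((s : Int) + 1)) ((k : Int) + 1))) (s : Int))) = false := by
          rw [contains_ofList]; simp
        rw [hhead]
        simp only [Bool.false_eq_true, ite_false]
        have htail : ∀ p ∈ PySem.List.enumerate t ((s : Int) + 1),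
            (!(PySem.Set.contains
              (PySem.Set.ofList ((s : Int) :: pzDrop (pzZeros t ((s : Int) + 1)) ((k : Int) + 1))) p.1)) =
            (!(PySem.Set.contains
              (PySem.Set.ofList (pzDrop (pzZeros t ((s : Int) + 1)) ((k : Int) + 1))) p.1)) := by
          intro p hp
          obtain ⟨k', _, rfl⟩ := (PySem.List.mem_enumerate_iff t ((s : Int) + 1) p).mp hp
          have hne : ((s : Int) + 1 + (k' : Int)) ≠ (s : Int) := by omega
          rw [contains_ofList, contains_ofList]
          simp [List.mem_cons, hne]
        rw [List.filter_congr htail]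
        rw [hs1, hk1, ih (s + 1) (k + 1)]
        simp [pzNorm, hk]
    · rw [pzZeros_cons, if_neg hx, PySem.List.enumerate_cons, List.filter_cons]
      have hhead : (!(PySem.Set.contains
          (PySem.Set.ofList (pzDrop (pzZeros t ((s : Int) + 1)) (k : Int))) (s : Int))) = true := by
        rw [contains_ofList]
        simp [not_mem_pzDrop_of_lt t ((s : Int) + 1) (k : Int) (s : Int) (by omega)]
      rw [hhead, if_pos rfl]
      simp only [List.map_cons]
      rw [hs1, ih (s + 1) k]
      simp [pzNorm, hx]

-- A's fold over the elements computes pzNorm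
lemma A_loop (l : List Int) (k : Nat) (acc : List Int) :
    (l.foldl
      (fun (st : Int × List Int) x =>
        if x = 0 then
          if PySem.Int.mod (st.1 + 1) 2 = 1 then (st.1 + 1, st.2 ++ [x])
          else (st.1 + 1, st.2)
        else (st.1, st.2 ++ [x]))
      ((k : Int), acc)).2 = acc ++ pzNorm l k := by
  induction l generalizing k acc with
  | nil => simp [pzNorm]
  | cons x t ih =>
    simp only [List.foldl_cons]
    by_cases hx : x = 0
    · subst hx
      rw [if_pos rfl]
      have hmod : PySem.Int.mod ((k : Int) + 1) 2 = ((k : Int) + 1) % 2 := by simp [pysem]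
      have hk1 : ((k : Int) + 1) = ((k + 1 : Nat) : Int) := by push_cast; ring
      by_cases hk : k % 2 = 0
      · have h1 : PySem.Int.mod ((k : Int) + 1) 2 = 1 := by rw [hmod]; omega
        rw [if_pos h1, hk1, ih]
        simp [pzNorm, hk]
      · have h1 : ¬ PySem.Int.mod ((k : Int) + 1) 2 = 1 := by rw [hmod]; omega
        rw [if_neg h1, hk1, ih]
        simp [pzNorm, hk]
    · rw [if_neg hx, ih]
      simp [pzNorm, hx]

theorem pair_zeros_eq_norm (arr : List Int) : pair_zeros arr = pzNorm arr 0 := by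
  unfold pair_zeros
  rw [show (fun (st : Int × List Int) i =>
        if PySem.List.pyGetD arr i 0 = 0 then
          if PySem.Int.mod (st.1 + 1) 2 = 1 then (st.1 + 1, st.2 ++ [PySem.List.pyGetD arr i 0])
          else (st.1 + 1, st.2)
        else (st.1, st.2 ++ [PySem.List.pyGetD arr i 0]))
      = (fun (st : Int × List Int) i =>
          (fun (st : Int × List Int) x =>
            if x = 0 then
              if PySem.Int.mod (st.1 + 1) 2 = 1 then (st.1 + 1, st.2 ++ [x])
              else (st.1 + 1, st.2)
            else (st.1, st.2 ++ [x])) st (PySem.List.pyGetD arr i 0)) from rfl]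
  rw [← List.foldl_map (f := fun j => PySem.List.pyGetD arr j 0)
        (g := fun (st : Int × List Int) x =>
          if x = 0 then
            if PySem.Int.mod (st.1 + 1) 2 = 1 then (st.1 + 1, st.2 ++ [x])
            else (st.1 + 1, st.2)
          else (st.1, st.2 ++ [x]))
        (l := PySem.List.pyRange 0 (PySem.List.len arr) 1) (init := ((0 : Int), ([] : List Int)))]
  rw [PySem.List.map_pyGetD_pyRange_zero]
  simpa using A_loop arr 0 []

theorem pair_zeros_alt_eq_norm (arr : List Int) : pair_zeros_alt arr = pzNorm arr 0 := by
  have := B_loop arr 0 0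
  simpa [pair_zeros_alt, pzZeros, pzDrop] using this

-- ===== VERDICT (by name: the statement is the Claim_ definition above) =====
theorem pair_zeros_spec : Claim_equal_pair_zeros := by
  intro arr _
  unfold Spec_pair_zeros
  rw [pair_zeros_eq_norm, pair_zeros_alt_eq_norm]
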